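-- pv_equiv track=rewrite | github.com/elokus/Misso-BotEnv | Backtester/indicators/wave_cluster.py | _merge_tx_waves
-- ===== SOURCE A (Python) =====
-- def _merge_tx_waves(filtered_waves: dict) -> dict:
--     def is_in_range(x, mi, mx):
--         if mi is None or mx is None:
--             return False
--         return x >= mi and x <=mx
--
--     waves = []
--     indices = []
--     mi, mx = None, None
--
--     for tx, wa in filtered_waves.items():
--         for idx, w in wa.items():
--             if not is_in_range(w, mi, mx):
--                 waves.append(w)
--                 indices.append((tx, idx))
--         mi = min(waves)
--         mx = max(waves)
--     return dict(zip(indices, waves))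
-- ===== SOURCE B (Python) =====
-- def _merge_tx_waves(filtered_waves: dict) -> dict:
--     txs = list(filtered_waves.items())
--     # stage 1: running extrema of ALL waves, snapshotted after each transaction
--     bounds = []
--     lo, hi = None, None
--     for _, wa in txs:
--         for w in wa.values():
--             if lo is None or w < lo:
--                 lo = w
--             if hi is None or w > hi:
--                 hi = w
--         bounds.append((lo, hi))
--     # stage 2: keep a wave iff it escapes the extrema of the previous transactions
--     return {
--         (tx, idx): w
--         for t, (tx, wa) in enumerate(txs)
--         for idx, w in wa.items()
--         if t == 0 or bounds[t - 1][0] is None or w < bounds[t - 1][0] or w > bounds[t - 1][1]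
--     }
-- ===== Notes on version B (the rewrite author's own statement) =====
-- stated objective: alternative
-- what changed: B is two staged passes instead of A's single interleaved loop: stage 1 precomputes one (lo, hi) snapshot per transaction as the running extrema of ALL waves (provably equal to A's min()/max() rescans of the kept list), stage 2 is a dict comprehension keeping a wave iff it escapes the previous transaction's precomputed bounds.
import Mathlib
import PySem

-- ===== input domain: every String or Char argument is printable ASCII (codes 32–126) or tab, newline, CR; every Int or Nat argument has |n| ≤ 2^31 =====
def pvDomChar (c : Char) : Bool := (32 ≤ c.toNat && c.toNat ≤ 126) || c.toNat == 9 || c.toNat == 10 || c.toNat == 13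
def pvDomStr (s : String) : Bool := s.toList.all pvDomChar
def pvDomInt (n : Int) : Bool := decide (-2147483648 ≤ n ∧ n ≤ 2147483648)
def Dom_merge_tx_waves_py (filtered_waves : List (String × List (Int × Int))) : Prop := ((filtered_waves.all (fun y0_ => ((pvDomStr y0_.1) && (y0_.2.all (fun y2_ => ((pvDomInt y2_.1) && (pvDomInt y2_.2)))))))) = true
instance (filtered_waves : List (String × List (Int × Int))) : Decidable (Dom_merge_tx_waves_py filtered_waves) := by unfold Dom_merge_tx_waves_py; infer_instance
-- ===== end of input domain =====

-- B replaces A's interleaved loop (rescan min/max of the kept list after each transaction) by two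
-- staged passes: precompute prefix extrema of ALL waves per transaction, then filter by them.


-- ===== PORT A =====
-- is_in_range(x, mi, mx)
def pvIsInRange (x : Int) (mi mx : Option Int) : Bool :=
  match mi, mx with
  | some a, some b => decide (a ≤ x) && decide (x ≤ b)
  | _, _ => false

-- body of A's inner 'for idx, w in wa.items()' loop (state: waves, indices)
def pvInnerA (mi mx : Option Int) (tx : String)
    (p : List Int × List (String × Int)) (iw : Int × Int) : List Int × List (String × Int) :=
  if pvIsInRange iw.2 mi mx then p
  else (p.1 ++ [iw.2], p.2 ++ [(tx, iw.1)])

-- body of A's outer 'for tx, wa in filtered_waves.items()' loop (state: waves, indices, mi, mx)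
def pvOuterA (st : List Int × List (String × Int) × Option Int × Option Int)
    (txwa : String × List (Int × Int)) :
    List Int × List (String × Int) × Option Int × Option Int :=
  let p := txwa.2.foldl (pvInnerA st.2.2.1 st.2.2.2 txwa.1) (st.1, st.2.1)
  -- mi = min(waves); mx = max(waves)  (Python raises on empty waves: Pre_ excludes that)
  (p.1, p.2, PySem.List.min? p.1 (fun x => x), PySem.List.max? p.1 (fun x => x))

def merge_tx_waves_py (filtered_waves : List (String × List (Int × Int))) : List (String × Int × Int) :=
  let st := filtered_waves.foldl pvOuterA ([], [], none, none)
  -- dict(zip(indices, waves)), flattened to (tx, idx, w) triples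
  (PySem.Dict.ofList (st.2.1.zip st.1)).items.map (fun q => (q.1.1, q.1.2, q.2))

-- ===== PORT B =====
-- stage-1 body: 'if lo is None or w < lo: lo = w' ; 'if hi is None or w > hi: hi = w'
def pvBnd (p : Option Int × Option Int) (w : Int) : Option Int × Option Int :=
  ((match p.1 with | none => some w | some lo => if w < lo then some w else some lo),
   (match p.2 with | none => some w | some hi => if hi < w then some w else some hi))

-- one outer iteration of stage 1: fold the transaction's waves into (lo, hi), append the snapshot
def pvBoundsStep (st : List (Option Int × Option Int) × Option Int × Option Int)
    (txwa : String × List (Int × Int)) :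
    List (Option Int × Option Int) × Option Int × Option Int :=
  let p := txwa.2.foldl (fun q iw => pvBnd q iw.2) st.2
  (st.1 ++ [p], p)

-- stage 1: 'bounds' list, one (lo, hi) snapshot per transaction
def pvBounds (fw : List (String × List (Int × Int))) : List (Option Int × Option Int) :=
  (fw.foldl pvBoundsStep ([], none, none)).1

-- stage-2 test: 't == 0 or bounds[t-1][0] is None or w < bounds[t-1][0] or w > bounds[t-1][1]'
-- (bounds[t-1] is always in range when evaluated: t ≥ 1 and len(bounds) = len(txs), hence pyGetD;
--  the (some, none) case cannot arise: lo and hi are set together in stage 1)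
def pvKeepB (t : Int) (bounds : List (Option Int × Option Int)) (w : Int) : Bool :=
  if t == 0 then true
  else match PySem.List.pyGetD bounds (t - 1) (none, none) with
    | (none, _) => true
    | (some lo, some hi) => decide (w < lo) || decide (hi < w)
    | (some _, none) => true

def merge_tx_waves_py_alt (filtered_waves : List (String × List (Int × Int))) : List (String × Int × Int) :=
  let bounds := pvBounds filtered_waves
  -- stage 2: the dict comprehension, flattened to (tx, idx, w) triples
  let items := (PySem.List.enumerate filtered_waves 0).flatMap (fun tp =>
    (tp.2.2.filter (fun iw => pvKeepB tp.1 bounds iw.2)).map (fun iw => ((tp.2.1, iw.1), iw.2)))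
  (PySem.Dict.ofList items).items.map (fun q => (q.1.1, q.1.2, q.2))

-- ===== PRECONDITION & SPEC =====
-- Pre_ excludes exactly the inputs where the Python A raises: a non-empty dict whose FIRST
-- transaction has an empty wave dict makes A call min([]) (ValueError). Everywhere else A returns.
def Pre_merge_tx_waves_py (filtered_waves : List (String × List (Int × Int))) : Prop :=
  (match filtered_waves with
   | [] => true
   | (_, wa) :: _ => !wa.isEmpty) = true

instance (filtered_waves : List (String × List (Int × Int))) : Decidable (Pre_merge_tx_waves_py filtered_waves) := by unfold Pre_merge_tx_waves_py; infer_instance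

def pvWitness_merge_tx_waves_py : (List (String × List (Int × Int))) := [("a", [(0, 1)])]

def Spec_merge_tx_waves_py (filtered_waves : List (String × List (Int × Int))) (out : List (String × Int × Int)) : Prop := out = merge_tx_waves_py_alt filtered_waves
instance (filtered_waves : List (String × List (Int × Int))) (out : List (String × Int × Int)) : Decidable (Spec_merge_tx_waves_py filtered_waves out) := by unfold Spec_merge_tx_waves_py; infer_instance

-- ===== CLAIM (what is proved, stated in full; the proofs are below) =====
def Claim_equal_merge_tx_waves_py : Prop := ∀ (filtered_waves : List (String × List (Int × Int))), Dom_merge_tx_waves_py filtered_waves → Pre_merge_tx_waves_py filtered_waves → Spec_merge_tx_waves_py filtered_waves (merge_tx_waves_py filtered_waves)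

-- ===== LEMMAS AND PROOFS =====

theorem pvMin?_append (l : List Int) (w : Int) :
    PySem.List.min? (l ++ [w]) (fun x => x) =
      some (match PySem.List.min? l (fun x => x) with
            | none => w
            | some a => min a w) := by
  cases l with
  | nil => simp [PySem.List.min?]
  | cons x t =>
      rw [List.cons_append, PySem.List.min?_id_cons, PySem.List.min?_id_cons]
      simp [List.foldl_append]

theorem pvMax?_append (l : List Int) (w : Int) :
    PySem.List.max? (l ++ [w]) (fun x => x) =
      some (match PySem.List.max? l (fun x => x) with
            | none => w
            | some a => max a w) := by
  cases l with
  | nil => simp [PySem.List.max?]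
  | cons x t =>
      rw [List.cons_append, PySem.List.max?_id_cons, PySem.List.max?_id_cons]
      simp [List.foldl_append]

-- stage 1 restarted from a running pair p (proof helper)
def pvBoundsFrom (p : Option Int × Option Int) (fw : List (String × List (Int × Int))) :
    List (Option Int × Option Int) :=
  (fw.foldl pvBoundsStep ([], p)).1

theorem pvBounds_acc : ∀ (fw : List (String × List (Int × Int)))
    (acc : List (Option Int × Option Int)) (p : Option Int × Option Int),
    (fw.foldl pvBoundsStep (acc, p)).1 = acc ++ pvBoundsFrom p fw := by
  intro fw
  induction fw with
  | nil => intro acc p; simp [pvBoundsFrom]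
  | cons txwa rest ih =>
      intro acc p
      simp only [pvBoundsFrom, List.foldl_cons, pvBoundsStep, List.nil_append]
      rw [ih, ih]
      simp [List.append_assoc]

theorem pvBoundsFrom_cons (p : Option Int × Option Int) (txwa : String × List (Int × Int))
    (rest : List (String × List (Int × Int))) :
    pvBoundsFrom p (txwa :: rest) =
      (txwa.2.foldl (fun q iw => pvBnd q iw.2) p) ::
        pvBoundsFrom (txwa.2.foldl (fun q iw => pvBnd q iw.2) p) rest := by
  simp only [pvBoundsFrom, List.foldl_cons, pvBoundsStep, List.nil_append]
  rw [pvBounds_acc]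
  simp [pvBoundsFrom]

-- stage-2 test vs A's is_in_range, given what bounds[t-1] is
theorem pvKeep_equiv (t : Nat) (bounds : List (Option Int × Option Int)) (lo hi : Option Int)
    (w : Int) (h0 : t = 0 → lo = none)
    (hprev : t ≠ 0 → PySem.List.pyGetD bounds ((t : Int) - 1) (none, none) = (lo, hi)) :
    pvKeepB (t : Int) bounds w = !pvIsInRange w lo hi := by
  cases t with
  | zero => simp [pvKeepB, pvIsInRange, h0 rfl]
  | succ n =>
      have h := hprev (Nat.succ_ne_zero n)
      have ht : ((n + 1 : Nat) : Int) ≠ 0 := by omega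
      simp only [pvKeepB, beq_iff_eq, ht, if_false, h]
      cases lo with
      | none => simp [pvIsInRange]
      | some a =>
          cases hi with
          | none => simp [pvIsInRange]
          | some b =>
              simp only [pvIsInRange]
              rw [Bool.eq_iff_iff]
              simp only [Bool.or_eq_true, decide_eq_true_iff, Bool.not_eq_true',
                Bool.and_eq_false_iff, decide_eq_false_iff_not]
              omega

-- inner loop: A's kept list has the same extrema as B's running all-wave bounds
theorem pv_inner (tx : String) (snapLo snapHi : Option Int) :
    ∀ (wa : List (Int × Int)) (ws : List Int) (is_ : List (String × Int)) (lo hi : Option Int),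
    PySem.List.min? ws (fun x => x) = lo →
    PySem.List.max? ws (fun x => x) = hi →
    is_.length = ws.length →
    (∀ a, snapLo = some a → ∃ c, lo = some c ∧ c ≤ a) →
    (∀ b, snapHi = some b → ∃ c, hi = some c ∧ b ≤ c) →
    (PySem.List.min? (wa.foldl (pvInnerA snapLo snapHi tx) (ws, is_)).1 (fun x => x)
        = (wa.foldl (fun q iw => pvBnd q iw.2) (lo, hi)).1 ∧
     PySem.List.max? (wa.foldl (pvInnerA snapLo snapHi tx) (ws, is_)).1 (fun x => x)
        = (wa.foldl (fun q iw => pvBnd q iw.2) (lo, hi)).2 ∧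
     (wa.foldl (pvInnerA snapLo snapHi tx) (ws, is_)).2.length
        = (wa.foldl (pvInnerA snapLo snapHi tx) (ws, is_)).1.length ∧
     (wa.foldl (pvInnerA snapLo snapHi tx) (ws, is_)).2.zip
         (wa.foldl (pvInnerA snapLo snapHi tx) (ws, is_)).1
        = is_.zip ws ++ (wa.filter (fun iw => !pvIsInRange iw.2 snapLo snapHi)).map
            (fun iw => ((tx, iw.1), iw.2))) := by
  intro wa
  induction wa with
  | nil =>
      intro ws is_ lo hi hmi hmx hlen _ _
      exact ⟨hmi, hmx, hlen, by simp⟩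
  | cons iw rest ih =>
      intro ws is_ lo hi hmi hmx hlen hloLe hhiLe
      simp only [List.foldl_cons]
      by_cases hr : pvIsInRange iw.2 snapLo snapHi
      · -- discarded: iw.2 lies inside the snapshot range, so pvBnd leaves (lo, hi) unchanged
        obtain ⟨a, b, hsl, hsh, haw, hwb⟩ :
            ∃ a b, snapLo = some a ∧ snapHi = some b ∧ a ≤ iw.2 ∧ iw.2 ≤ b := by
          cases hl : snapLo with
          | none => rw [hl] at hr; cases snapHi <;> simp [pvIsInRange] at hr
          | some a =>
              cases hh : snapHi with
              | none => rw [hl, hh] at hr; simp [pvIsInRange] at hr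
              | some b =>
                  rw [hl, hh] at hr
                  simp only [pvIsInRange, Bool.and_eq_true, decide_eq_true_iff] at hr
                  exact ⟨a, b, rfl, rfl, hr.1, hr.2⟩
        obtain ⟨c, hc, hca⟩ := hloLe a hsl
        obtain ⟨d, hd, hbd⟩ := hhiLe b hsh
        have hbnd : pvBnd (lo, hi) iw.2 = (lo, hi) := by
          simp only [pvBnd, hc, hd]
          rw [if_neg (by omega : ¬ iw.2 < c), if_neg (by omega : ¬ d < iw.2)]
        have hA : pvInnerA snapLo snapHi tx (ws, is_) iw = (ws, is_) := by
          simp [pvInnerA, hr]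
        rw [hA, hbnd]
        have := ih ws is_ lo hi hmi hmx hlen hloLe hhiLe
        simpa [hr] using this
      · -- kept: both sides extend with iw.2
        have hA : pvInnerA snapLo snapHi tx (ws, is_) iw
            = (ws ++ [iw.2], is_ ++ [(tx, iw.1)]) := by simp [pvInnerA, hr]
        rw [hA]
        have hmi' : PySem.List.min? (ws ++ [iw.2]) (fun x => x) = (pvBnd (lo, hi) iw.2).1 := by
          rw [pvMin?_append, hmi]
          cases lo with
          | none => rfl
          | some a =>
              simp only [pvBnd]
              split_ifs with h
              · simp; omega
              · simp; omega
        have hmx' : PySem.List.max? (ws ++ [iw.2]) (fun x => x) = (pvBnd (lo, hi) iw.2).2 := by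
          rw [pvMax?_append, hmx]
          cases hi with
          | none => rfl
          | some b =>
              simp only [pvBnd]
              split_ifs with h
              · simp; omega
              · simp; omega
        have hloLe' : ∀ a, snapLo = some a → ∃ c, (pvBnd (lo, hi) iw.2).1 = some c ∧ c ≤ a := by
          intro a hsl
          obtain ⟨c, hc, hca⟩ := hloLe a hsl
          simp only [pvBnd, hc]
          split_ifs with h
          · exact ⟨iw.2, rfl, by omega⟩
          · exact ⟨c, rfl, hca⟩
        have hhiLe' : ∀ b, snapHi = some b → ∃ c, (pvBnd (lo, hi) iw.2).2 = some c ∧ b ≤ c := by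
          intro b hsh
          obtain ⟨d, hd, hbd⟩ := hhiLe b hsh
          simp only [pvBnd, hd]
          split_ifs with h
          · exact ⟨iw.2, rfl, by omega⟩
          · exact ⟨d, rfl, hbd⟩
        have hlen' : (is_ ++ [(tx, iw.1)]).length = (ws ++ [iw.2]).length := by simp [hlen]
        have := ih (ws ++ [iw.2]) (is_ ++ [(tx, iw.1)]) _ _ hmi' hmx' hlen' hloLe' hhiLe'
        obtain ⟨h1, h2, h3, h4⟩ := this
        refine ⟨h1, h2, h3, ?_⟩
        rw [h4, List.zip_append hlen]
        simp [hr]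

-- outer loop: A's fold produces exactly B's stage-2 items, from any consistent state
theorem pv_outer :
    ∀ (fw : List (String × List (Int × Int))) (ws : List Int) (is_ : List (String × Int))
      (lo hi : Option Int) (t : Nat) (bounds : List (Option Int × Option Int)),
    PySem.List.min? ws (fun x => x) = lo →
    PySem.List.max? ws (fun x => x) = hi →
    is_.length = ws.length →
    (t = 0 → lo = none) →
    (t ≠ 0 → PySem.List.pyGetD bounds ((t : Int) - 1) (none, none) = (lo, hi)) →
    (∃ bpre, bpre.length = t ∧ bounds = bpre ++ pvBoundsFrom (lo, hi) fw) →
    (fw.foldl pvOuterA (ws, is_, lo, hi)).2.1.zip (fw.foldl pvOuterA (ws, is_, lo, hi)).1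
      = is_.zip ws ++ (PySem.List.enumerate fw (t : Int)).flatMap (fun tp =>
          (tp.2.2.filter (fun iw => pvKeepB tp.1 bounds iw.2)).map
            (fun iw => ((tp.2.1, iw.1), iw.2))) := by
  intro fw
  induction fw with
  | nil => intro ws is_ lo hi t bounds _ _ _ _ _ _; simp [PySem.List.enumerate]
  | cons txwa rest ih =>
      intro ws is_ lo hi t bounds hmi hmx hlen h0 hprev hb
      obtain ⟨bpre, hbl, hbeq⟩ := hb
      obtain ⟨h1, h2, h3, h4⟩ := pv_inner txwa.1 lo hi txwa.2 ws is_ lo hi hmi hmx hlen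
        (fun a ha => ⟨a, ha, le_refl a⟩) (fun b hb => ⟨b, hb, le_refl b⟩)
      set q := txwa.2.foldl (fun q iw => pvBnd q iw.2) (lo, hi) with hq
      set p := txwa.2.foldl (pvInnerA lo hi txwa.1) (ws, is_) with hp
      have hstate : pvOuterA (ws, is_, lo, hi) txwa = (p.1, p.2, q.1, q.2) := by
        show (p.1, p.2, PySem.List.min? p.1 (fun x => x), PySem.List.max? p.1 (fun x => x))
          = (p.1, p.2, q.1, q.2)
        rw [h1, h2]
      have hbeq2 : bounds = bpre ++ q :: pvBoundsFrom q rest := by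
        rw [hbeq, pvBoundsFrom_cons, ← hq]
      have hget : bounds.getD t (none, none) = q := by
        rw [hbeq2, ← hbl, List.getD_eq_getElem?_getD, List.getElem?_append_right (le_refl _)]
        simp
      have hget' : PySem.List.pyGetD bounds ((t : Int) + 1 - 1) (none, none) = q := by
        have ht2 : ((t : Int) + 1 - 1) = ((t : Nat) : Int) := by omega
        rw [ht2, PySem.List.pyGetD_natCast]
        exact hget
      have ihres := ih p.1 p.2 q.1 q.2 (t + 1) bounds h1 h2 h3
        (by omega)
        (by intro _
            have hcast : (((t + 1 : Nat) : Int) - 1) = ((t : Int) + 1 - 1) := by push_cast; ring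
            rw [hcast, hget'])
        ⟨bpre ++ [q], by simp [hbl], by rw [hbeq2]; simp⟩
      have hkeep : (fun iw : Int × Int => pvKeepB ((t : Nat) : Int) bounds iw.2)
          = (fun iw => !pvIsInRange iw.2 lo hi) :=
        funext fun iw => pvKeep_equiv t bounds lo hi iw.2 h0 hprev
      rw [List.foldl_cons, hstate, ihres, h4, PySem.List.enumerate_cons]
      simp only [List.flatMap_cons]
      rw [hkeep]
      have hc : ((t : Int) + 1) = (((t + 1 : Nat)) : Int) := by push_cast; ring
      rw [hc, List.append_assoc]

-- the two ports agree on EVERY input (Python A raises outside Pre_; the Lean port is total)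
theorem pvPorts_eq (fw : List (String × List (Int × Int))) :
    merge_tx_waves_py fw = merge_tx_waves_py_alt fw := by
  have h := pv_outer fw [] [] none none 0 (pvBounds fw) rfl rfl rfl (fun _ => rfl)
    (fun h => absurd rfl h) ⟨[], rfl, rfl⟩
  simp only [List.zip_nil_right, List.nil_append] at h
  simp only [merge_tx_waves_py, merge_tx_waves_py_alt]
  rw [show ((0 : Nat) : Int) = (0 : Int) from rfl] at h
  rw [h]

-- ===== VERDICT (by name: the statement is the Claim_ definition above) =====
theorem merge_tx_waves_py_spec : Claim_equal_merge_tx_waves_py := by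
  intro fw _ _
  unfold Spec_merge_tx_waves_py
  exact pvPorts_eq fw
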